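-- pv_equiv track=rewrite | github.com/EliahKagan/old-practice-snapshot | main/recursive-sequence/recursive-sequence.py | compute_sequence
-- ===== SOURCE A (Python) =====
-- from functools import reduce
-- from operator import mul
--
-- def compute_sequence(nmax):
--     acc = 0
--     cur = 1
--
--     for i in range(1, nmax + 1):
--         nxt = cur + i
--         acc += reduce(mul, range(cur, nxt))
--         yield acc
--         cur = nxt
-- ===== SOURCE B (Python) =====
-- def compute_sequence(nmax):
--     total = nmax * (nmax + 1) // 2 if nmax > 0 else 0
--     acc = 0
--     prod = 1
--     blocklen = 1
--     count = 0
--     for k in range(1, total + 1):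
--         prod *= k
--         count += 1
--         if count == blocklen:
--             acc += prod
--             yield acc
--             prod = 1
--             count = 0
--             blocklen += 1
-- ===== Notes on version B (the rewrite author's own statement) =====
-- stated objective: alternative
-- what changed: Replaces the nested structure (outer loop per block with an inner reduce(mul, range(cur,nxt)) pass and cur/nxt boundary state) by one flat loop over all integers 1..nmax*(nmax+1)//2 that maintains a running in-block product and a block-length counter and emits the running sum at each block boundary.
import Mathlib
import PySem

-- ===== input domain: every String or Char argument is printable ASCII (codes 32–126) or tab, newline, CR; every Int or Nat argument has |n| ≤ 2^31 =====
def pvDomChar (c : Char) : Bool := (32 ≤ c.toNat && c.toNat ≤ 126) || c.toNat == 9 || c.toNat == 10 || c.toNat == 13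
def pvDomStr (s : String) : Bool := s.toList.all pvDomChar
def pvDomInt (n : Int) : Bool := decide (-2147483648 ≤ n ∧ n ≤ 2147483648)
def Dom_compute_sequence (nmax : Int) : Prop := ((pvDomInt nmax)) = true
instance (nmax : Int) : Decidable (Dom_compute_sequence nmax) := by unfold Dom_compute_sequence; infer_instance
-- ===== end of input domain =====

-- B replaces A's nested loops (outer per-block loop with an inner reduce(mul, ...) pass and
-- cur/nxt boundary state) by one flat loop over 1..nmax*(nmax+1)//2 with a running in-block
-- product and a block-length counter; same cost, different traversal (objective: alternative).
-- A is a generator; both ports return the list of yielded values.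

-- ===== PORT A =====
-- reduce(mul, l): Python raises TypeError on l = []; here the argument range is never empty
-- (i ≥ 1), so the [] case is unreachable and its value arbitrary.
def pyReduceMul : List Int → Int
  | [] => 0
  | h :: t => t.foldl (· * ·) h

def stepA (st : Int × Int × List Int) (i : Int) : Int × Int × List Int :=
  let nxt := st.2.1 + i
  let acc := st.1 + pyReduceMul (PySem.List.pyRange st.2.1 nxt 1)
  (acc, nxt, st.2.2 ++ [acc])

def compute_sequence (nmax : Int) : List Int :=
  ((PySem.List.pyRange 1 (nmax + 1) 1).foldl stepA (0, 1, [])).2.2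

-- ===== PORT B =====
-- state: (acc, prod, blocklen, count, out)
def stepB (st : Int × Int × Int × Int × List Int) (k : Int) :
    Int × Int × Int × Int × List Int :=
  let prod := st.2.1 * k
  let count := st.2.2.2.1 + 1
  if count == st.2.2.1 then
    let acc := st.1 + prod
    (acc, 1, st.2.2.1 + 1, 0, st.2.2.2.2 ++ [acc])
  else
    (st.1, prod, st.2.2.1, count, st.2.2.2.2)

def compute_sequence_alt (nmax : Int) : List Int :=
  let total : Int := if nmax > 0 then PySem.Int.floordiv (nmax * (nmax + 1)) 2 else 0
  ((PySem.List.pyRange 1 (total + 1) 1).foldl stepB (0, 1, 1, 0, [])).2.2.2.2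

-- ===== PRECONDITION & SPEC =====
def Spec_compute_sequence (nmax : Int) (out : List Int) : Prop := out = compute_sequence_alt nmax
instance (nmax : Int) (out : List Int) : Decidable (Spec_compute_sequence nmax out) := by unfold Spec_compute_sequence; infer_instance

-- ===== CLAIM (what is proved, stated in full; the proofs are below) =====
def Claim_equal_compute_sequence : Prop := ∀ (nmax : Int), Dom_compute_sequence nmax → Spec_compute_sequence nmax (compute_sequence nmax)

-- ===== LEMMAS AND PROOFS =====

theorem foldl_mul_eq_prod (t : List Int) (h : Int) : t.foldl (· * ·) h = h * t.prod := by
  induction t generalizing h with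
  | nil => simp
  | cons x xs ih => simp [List.foldl_cons, ih, List.prod_cons, mul_assoc]

theorem pyReduceMul_eq_prod (l : List Int) (hl : l ≠ []) : pyReduceMul l = l.prod := by
  match l with
  | [] => exact absurd rfl hl
  | h :: t => simp [pyReduceMul, foldl_mul_eq_prod, List.prod_cons]

-- triangular numbers (as integers)
def T (n : Nat) : Int := ((n * (n + 1) / 2 : Nat) : Int)

theorem T_succ (n : Nat) : T (n + 1) = T n + (n + 1) := by
  unfold T
  have h2 : 2 ∣ n * (n + 1) := (Nat.even_mul_succ_self n).two_dvd
  have hmul : (n + 1) * (n + 1 + 1) = n * (n + 1) + 2 * (n + 1) := by ring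
  have : (n + 1) * (n + 1 + 1) / 2 = n * (n + 1) / 2 + (n + 1) := by omega
  rw [this]; push_cast; ring

theorem T_nonneg (n : Nat) : 0 ≤ T n := Int.natCast_nonneg _

-- B inside a block: while count stays below blocklen, only prod and count change
theorem stepB_partial (m : Nat) (s acc prod b c : Int) (out : List Int)
    (h : c + m < b) :
    (PySem.List.pyRange s (s + m) 1).foldl stepB (acc, prod, b, c, out)
      = (acc, prod * (PySem.List.pyRange s (s + m) 1).prod, b, c + m, out) := by
  induction m generalizing prod c with
  | zero =>
    rw [PySem.List.pyRange_one_eq_nil (by omega : s + ((0:Nat):Int) ≤ s)]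
    simp
  | succ m ih =>
    push_cast at h ⊢
    rw [show s + ((m : Int) + 1) = (s + (m : Int)) + 1 by ring,
      PySem.List.pyRange_one_succ_right (by omega : s ≤ s + (m : Int)),
      List.foldl_append, ih prod c (by omega)]
    have hne : ((c + (m : Int) + 1) == b) = false := by
      rw [beq_eq_false_iff_ne]; omega
    simp only [stepB, List.foldl_cons, List.foldl_nil, hne, Bool.false_eq_true, if_false]
    simp [List.prod_append, mul_assoc, add_assoc]

-- B over a whole block of length b starting at s, entered with prod = 1, count = 0,
-- blocklen = b: it adds the block product, emits it, and resets
theorem stepB_block (b : Nat) (s acc : Int) (out : List Int) (hb : 1 ≤ b) :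
    (PySem.List.pyRange s (s + b) 1).foldl stepB (acc, 1, (b : Int), 0, out)
      = (acc + (PySem.List.pyRange s (s + b) 1).prod, 1, (b : Int) + 1, 0,
         out ++ [acc + (PySem.List.pyRange s (s + b) 1).prod]) := by
  obtain ⟨m, rfl⟩ : ∃ m, b = m + 1 := ⟨b - 1, by omega⟩
  push_cast
  rw [show s + ((m : Int) + 1) = (s + (m : Int)) + 1 by ring,
    PySem.List.pyRange_one_succ_right (by omega : s ≤ s + (m : Int)),
    List.foldl_append,
    stepB_partial m s acc 1 ((m : Int) + 1) 0 out (by omega)]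
  have heq : ((0 + (m : Int) + 1) == ((m : Int) + 1)) = true := by
    rw [beq_iff_eq]; ring
  simp only [stepB, List.foldl_cons, List.foldl_nil, heq, if_true]
  have hp : 1 * (PySem.List.pyRange s (s + (m : Int)) 1).prod * (s + (m : Int))
      = (PySem.List.pyRange s (s + (m : Int)) 1 ++ [s + (m : Int)]).prod := by
    rw [List.prod_append, List.prod_cons, List.prod_nil]; ring
  rw [hp]

-- main invariant: after n outer steps of A / T n flat steps of B the states correspond
theorem main_inv (n : Nat) :
    ∃ acc out,
      (PySem.List.pyRange 1 ((n : Int) + 1) 1).foldl stepA (0, 1, []) = (acc, T n + 1, out) ∧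
      (PySem.List.pyRange 1 (T n + 1) 1).foldl stepB (0, 1, 1, 0, []) = (acc, 1, (n : Int) + 1, 0, out) := by
  induction n with
  | zero =>
    refine ⟨0, [], ?_, ?_⟩
    · rw [show ((0:Nat):Int) + 1 = 1 by norm_num,
        PySem.List.pyRange_one_eq_nil (le_refl (1:Int))]
      simp [T]
    · rw [show T 0 + 1 = 1 by simp [T], PySem.List.pyRange_one_eq_nil (le_refl (1:Int))]
      simp
  | succ n ih =>
    obtain ⟨acc, out, hA, hB⟩ := ih
    have hnn : (0:Int) ≤ (n : Int) := Int.natCast_nonneg n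
    have hTnn := T_nonneg n
    -- the new block
    have hlt : T n + 1 < T n + 1 + ((n : Int) + 1) := by omega
    have hne : PySem.List.pyRange (T n + 1) (T n + 1 + ((n : Int) + 1)) 1 ≠ [] := by
      rw [PySem.List.pyRange_one_cons hlt]; simp
    set Q : Int := (PySem.List.pyRange (T n + 1) (T n + 1 + ((n : Int) + 1)) 1).prod with hQ
    refine ⟨acc + Q, out ++ [acc + Q], ?_, ?_⟩
    · -- A side
      push_cast
      rw [show (n : Int) + 1 + 1 = ((n : Int) + 1) + 1 from rfl,
        PySem.List.pyRange_one_succ_right (by omega : (1:Int) ≤ (n : Int) + 1),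
        List.foldl_append, hA]
      simp only [stepA, List.foldl_cons, List.foldl_nil]
      rw [pyReduceMul_eq_prod _ hne, ← hQ, T_succ]
      push_cast
      refine Prod.ext rfl (Prod.ext ?_ rfl)
      simp only
      ring
    · -- B side
      have hsplit : PySem.List.pyRange 1 (T (n + 1) + 1) 1
          = PySem.List.pyRange 1 (T n + 1) 1
            ++ PySem.List.pyRange (T n + 1) (T (n + 1) + 1) 1 := by
        exact PySem.List.pyRange_one_append 1 (T n + 1) (T (n + 1) + 1)
          (by omega) (by rw [T_succ]; push_cast; omega)
      rw [hsplit, List.foldl_append, hB]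
      have hbound : T (n + 1) + 1 = (T n + 1) + ((n + 1 : Nat) : Int) := by
        rw [T_succ]; push_cast; ring
      rw [hbound]
      have hblk := stepB_block (n + 1) (T n + 1) acc out (by omega)
      push_cast at hblk
      push_cast
      rw [hblk, ← hQ]

-- ===== VERDICT (by name: the statement is the Claim_ definition above) =====
theorem compute_sequence_spec : Claim_equal_compute_sequence := by
  intro nmax _
  unfold Spec_compute_sequence compute_sequence compute_sequence_alt
  by_cases h : nmax > 0
  · obtain ⟨n, rfl⟩ : ∃ n : Nat, nmax = (n : Int) := ⟨nmax.toNat, by omega⟩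
    rw [if_pos h]
    have htot : PySem.Int.floordiv ((n : Int) * ((n : Int) + 1)) 2 = T n := by
      rw [show ((n : Int) * ((n : Int) + 1)) = ((n * (n + 1) : Nat) : Int) by push_cast; ring,
        show (2:Int) = ((2:Nat):Int) from rfl, PySem.Int.floordiv_natCast]
      rfl
    rw [htot]
    obtain ⟨acc, out, hA, hB⟩ := main_inv n
    rw [hA]
    show (acc, T n + 1, out).2.2
        = ((PySem.List.pyRange 1 (T n + 1) 1).foldl stepB (0, 1, 1, 0, [])).2.2.2.2
    rw [hB]
  · rw [if_neg h]
    rw [PySem.List.pyRange_one_eq_nil (by omega : nmax + 1 ≤ 1)]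
    show (List.foldl stepA (0, 1, ([] : List Int)) []).2.2
        = ((PySem.List.pyRange 1 ((0:Int) + 1) 1).foldl stepB (0, 1, 1, 0, [])).2.2.2.2
    rw [PySem.List.pyRange_one_eq_nil (by omega : (0:Int) + 1 ≤ 1)]
    rfl
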